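-- pv_equiv track=rewrite | github.com/almostheking/nessus-vuln-analysis | nessus-vuln-analysis-xl.py | _Cycle_Opts
-- ===== SOURCE A (Python) =====
-- def _Cycle_Opts (opts):
--     nessusfile = ''
--     spreadsheet = ''
--     sheets = ''
--     month = ''
--     for opt, arg in opts:
--         if opt == "-n":
--             nessusfile = arg
--         elif opt == "-s":
--             spreadsheet = arg
--         elif opt == "-t":
--             sheets = arg
--         elif opt == "-m":
--             month = arg
--     return nessusfile, spreadsheet, sheets, month
-- ===== SOURCE B (Python) =====
-- def _Cycle_Opts(opts):
--     # Last-wins semantics: for each of the four options, scan the pairs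
--     # BACKWARDS and take the first (i.e. overall last) matching argument.
--     def last(key):
--         for opt, arg in reversed(opts):
--             if opt == key:
--                 return arg
--         return ''
--     return last('-n'), last('-s'), last('-t'), last('-m')
-- ===== Notes on version B (the rewrite author's own statement) =====
-- stated objective: alternative
-- what changed: Instead of A's single forward pass mutating four named variables through a four-way branch, B exploits the last-wins semantics directly: for each of the four keys it scans the pair list backwards and returns the first match found (with '' default), i.e. four independent early-exiting reverse searches replace the stateful accumulator loop.
import Mathlib
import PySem

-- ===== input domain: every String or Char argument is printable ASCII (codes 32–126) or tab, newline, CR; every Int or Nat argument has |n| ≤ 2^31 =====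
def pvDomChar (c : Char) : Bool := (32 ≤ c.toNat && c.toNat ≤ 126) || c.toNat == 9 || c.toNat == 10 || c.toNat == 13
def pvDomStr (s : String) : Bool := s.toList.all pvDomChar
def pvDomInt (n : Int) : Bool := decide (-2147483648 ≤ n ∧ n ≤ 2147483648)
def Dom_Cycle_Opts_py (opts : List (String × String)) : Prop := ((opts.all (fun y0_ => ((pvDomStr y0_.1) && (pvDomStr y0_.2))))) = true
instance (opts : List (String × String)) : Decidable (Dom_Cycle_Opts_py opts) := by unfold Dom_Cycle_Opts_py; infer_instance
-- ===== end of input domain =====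

-- ===== PORT A =====
-- B replaces A's stateful forward loop with four independent early-exiting reverse searches (objective: alternative).
def Cycle_Opts_py (opts : List (String × String)) : String × String × String × String :=
  opts.foldl (fun (st : String × String × String × String) oa =>
    if oa.1 == "-n" then (oa.2, st.2.1, st.2.2.1, st.2.2.2)
    else if oa.1 == "-s" then (st.1, oa.2, st.2.2.1, st.2.2.2)
    else if oa.1 == "-t" then (st.1, st.2.1, oa.2, st.2.2.2)
    else if oa.1 == "-m" then (st.1, st.2.1, st.2.2.1, oa.2)
    else st) ("", "", "", "")

-- ===== PORT B =====
-- Source B's `last`: first match while walking the reversed list, '' if none.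
def pvLastOpt (key : String) (opts : List (String × String)) : String :=
  match opts.reverse.find? (fun oa => oa.1 == key) with
  | some oa => oa.2
  | none => ""

def Cycle_Opts_py_alt (opts : List (String × String)) : String × String × String × String :=
  (pvLastOpt "-n" opts, pvLastOpt "-s" opts, pvLastOpt "-t" opts, pvLastOpt "-m" opts)

-- ===== PRECONDITION & SPEC =====
def Spec_Cycle_Opts_py (opts : List (String × String)) (out : String × String × String × String) : Prop := out = Cycle_Opts_py_alt opts
instance (opts : List (String × String)) (out : String × String × String × String) : Decidable (Spec_Cycle_Opts_py opts out) := by unfold Spec_Cycle_Opts_py; infer_instance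

-- ===== CLAIM (what is proved, stated in full; the proofs are below) =====
def Claim_equal_Cycle_Opts_py : Prop := ∀ (opts : List (String × String)), Dom_Cycle_Opts_py opts → Spec_Cycle_Opts_py opts (Cycle_Opts_py opts)

-- ===== LEMMAS AND PROOFS =====
-- A's fold from an arbitrary start state yields, per component, the last matching
-- argument (= first match in the reversed list) or the start value; proved by
-- induction from the right end of the list.
def pvLastOptD (key : String) (d : String) (opts : List (String × String)) : String :=
  match opts.reverse.find? (fun oa => oa.1 == key) with
  | some oa => oa.2
  | none => d

theorem cycle_inv (opts : List (String × String)) (st : String × String × String × String) :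
    opts.foldl (fun (st : String × String × String × String) oa =>
      if oa.1 == "-n" then (oa.2, st.2.1, st.2.2.1, st.2.2.2)
      else if oa.1 == "-s" then (st.1, oa.2, st.2.2.1, st.2.2.2)
      else if oa.1 == "-t" then (st.1, st.2.1, oa.2, st.2.2.2)
      else if oa.1 == "-m" then (st.1, st.2.1, st.2.2.1, oa.2)
      else st) st
    = (pvLastOptD "-n" st.1 opts, pvLastOptD "-s" st.2.1 opts,
       pvLastOptD "-t" st.2.2.1 opts, pvLastOptD "-m" st.2.2.2 opts) := by
  induction opts using List.reverseRecOn generalizing st with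
  | nil => simp [pvLastOptD]
  | append_singleton l x ih =>
    rcases x with ⟨o, a⟩
    simp only [List.foldl_append, List.foldl_cons, List.foldl_nil, ih]
    by_cases h1 : o = "-n" <;> by_cases h2 : o = "-s" <;>
      by_cases h3 : o = "-t" <;> by_cases h4 : o = "-m" <;>
      simp [pvLastOptD, h1, h2, h3, h4]

-- ===== VERDICT (by name: the statement is the Claim_ definition above) =====
theorem Cycle_Opts_py_spec : Claim_equal_Cycle_Opts_py := by
  intro opts _
  unfold Spec_Cycle_Opts_py Cycle_Opts_py Cycle_Opts_py_alt
  rw [cycle_inv]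
  rfl
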